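-- pv_equiv track=rewrite | github.com/hissue/Program-Solution | 프로그래머스/unrated/181881. 조건에 맞게 수열 변환하기 2/조건에 맞게 수열 변환하기 2.py | solution
-- ===== SOURCE A (Python) =====
-- def solution(arr):
--     count = 0
--     before = [ 0 * len(arr)]
--     while before != arr:
--         count+=1
--         before = [ _ for _ in arr]
--         for idx, data in enumerate(arr):
--             if data >= 50 and not data%2:
--                 arr[idx] = data//2
--             elif data < 50 and data%2:
--                 arr[idx] = data*2+1
--
--     return count-1
-- ===== SOURCE B (Python) =====
-- def solution(arr):
--     # Per-element simulation: each element's trajectory is independent, so the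
--     # number of whole-array passes until the fixpoint equals the max per-element
--     # step count. (Unlike A, this does not mutate arr; and solution([0]) == 0.)
--     def steps(x):
--         c = 0
--         while True:
--             if x >= 50 and not x % 2:
--                 y = x // 2
--             elif x < 50 and x % 2:
--                 y = x * 2 + 1
--             else:
--                 y = x
--             if y == x:
--                 return c
--             x = y
--             c += 1
--     best = 0
--     for x in arr:
--         c = steps(x)
--         if c > best:
--             best = c
--     return best
-- ===== Notes on version B (the rewrite author's own statement) =====
-- stated objective: alternative
-- what changed: B simulates each element's trajectory independently and returns the maximum per-element step count, instead of A's repeated whole-array passes each copying and comparing the entire list; B does not mutate arr (the equivalence is about the return value only).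
-- intended difference: On arr == [0] A returns -1 because its initial 'before' list is the typo [0*len(arr)] == [0] (clearly meant as [0]*len(arr)) and so compares equal before any counting pass; B returns the intended 0 since [0] is already stable. — e.g. on solution([0]): A returns -1, B returns 0
import Mathlib
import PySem

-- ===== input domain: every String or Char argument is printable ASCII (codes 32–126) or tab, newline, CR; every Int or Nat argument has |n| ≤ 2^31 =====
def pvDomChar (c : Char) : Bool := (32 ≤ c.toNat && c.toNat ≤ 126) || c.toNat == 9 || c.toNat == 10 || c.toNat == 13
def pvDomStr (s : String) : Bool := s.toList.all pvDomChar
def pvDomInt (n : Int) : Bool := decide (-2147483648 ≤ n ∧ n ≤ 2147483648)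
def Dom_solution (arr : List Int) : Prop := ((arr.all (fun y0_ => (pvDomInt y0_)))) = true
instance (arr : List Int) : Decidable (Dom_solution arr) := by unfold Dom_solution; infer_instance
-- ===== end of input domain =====

-- B replaces A's repeated whole-array passes (copying and comparing the whole
-- list each round) by an independent per-element simulation, returning the
-- maximum per-element step count. A mutates arr in place and B does not: the
-- equivalence proved here is about the RETURN value only.

-- ===== PORT A =====
-- the in-place 'for idx, data in enumerate(arr)' pass: each write is to the
-- index just read, so the pass is the obvious structural recursion over arr
def pvTransform : List Int → List Int
  | [] => []
  | data :: rest =>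
    (if data ≥ 50 ∧ PySem.Int.mod data 2 = 0 then PySem.Int.floordiv data 2
     else if data < 50 ∧ PySem.Int.mod data 2 ≠ 0 then data * 2 + 1
     else data) :: pvTransform rest

-- the 'while before != arr' loop; fuel is only a totality guard (the proof
-- shows 100 is never exhausted on Dom ∧ Pre inputs; Python A diverges outside Pre)
def pvLoopA : Nat → List Int → List Int → Int → Int
  | 0, _, _, count => count - 1
  | fuel + 1, before, arr, count =>
    if before = arr then count - 1
    else pvLoopA fuel arr (pvTransform arr) (count + 1)

def solution (arr : List Int) : Int :=
  pvLoopA 100 [0 * (arr.length : Int)] arr 0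

-- ===== PORT B =====
def pvStep (x : Int) : Int :=
  if x ≥ 50 ∧ PySem.Int.mod x 2 = 0 then PySem.Int.floordiv x 2
  else if x < 50 ∧ PySem.Int.mod x 2 ≠ 0 then x * 2 + 1
  else x

-- Source B's inner 'while True' counter; fuel is only a totality guard
def pvSteps : Nat → Int → Int → Int
  | 0, _, c => c
  | fuel + 1, x, c => if pvStep x = x then c else pvSteps fuel (pvStep x) (c + 1)

def solution_alt (arr : List Int) : Int :=
  arr.foldl (fun best x => let c := pvSteps 100 x 0; if c > best then c else best) 0

-- ===== PRECONDITION & SPEC =====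
-- Pre_ excludes exactly the inputs containing an odd element below -1, on which
-- A's doubling rule decreases forever and the while loop never terminates.
def Pre_solution (arr : List Int) : Prop :=
  ∀ x ∈ arr, PySem.Int.mod x 2 = 0 ∨ -1 ≤ x
instance (arr : List Int) : Decidable (Pre_solution arr) := by unfold Pre_solution; infer_instance
def pvWitness_solution : List Int := [98, 7, -4, 0, 51]

-- On arr = [0] A returns -1: its initial 'before' is the typo [0*len(arr)] = [0]
-- (clearly meant as [0]*len(arr)), which compares equal to arr before any pass;
-- B returns the intended 0, since [0] is already stable.
def D_solution (arr : List Int) : Prop := arr = [0]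
instance (arr : List Int) : Decidable (D_solution arr) := by unfold D_solution; infer_instance
def Spec_solution (arr : List Int) (out : Int) : Prop := ¬ D_solution arr → out = solution_alt arr
instance (arr : List Int) (out : Int) : Decidable (Spec_solution arr out) := by unfold Spec_solution; infer_instance
def pvDiffWitness_solution : List Int := [0]
def pvDiffWitnessOut_solution : Int × Int := (-1, 0)

-- ===== CLAIM (what is proved, stated in full; the proofs are below) =====
def Claim_unchanged_solution : Prop := ∀ (arr : List Int), Dom_solution arr → Pre_solution arr → Spec_solution arr (solution arr)
def Claim_changed_solution : Prop := Dom_solution (pvDiffWitness_solution) ∧ Pre_solution (pvDiffWitness_solution) ∧ D_solution (pvDiffWitness_solution) ∧ solution (pvDiffWitness_solution) = pvDiffWitnessOut_solution.1 ∧ solution_alt (pvDiffWitness_solution) = pvDiffWitnessOut_solution.2 ∧ pvDiffWitnessOut_solution.1 ≠ pvDiffWitnessOut_solution.2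
def Claim_exact_solution : Prop := ∀ (arr : List Int), Dom_solution arr → Pre_solution arr → D_solution arr → solution arr ≠ solution_alt arr

-- ===== LEMMAS AND PROOFS =====

-- an element x is "good": odd elements are ≥ -1 (Pre_) and x ≤ 2^31 (Dom);
-- goodness is preserved by pvStep and guarantees stabilisation within 32 steps
def pvGood (x : Int) : Prop := (PySem.Int.mod x 2 = 0 ∨ -1 ≤ x) ∧ x ≤ 2147483648

-- stabilised within n steps
def pvSW (n : Nat) (x : Int) : Prop := pvStep (pvStep^[n] x) = pvStep^[n] x

-- fuel-free counter used only in proofs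
def pvCount : Nat → Int → Nat
  | 0, _ => 0
  | f + 1, x => if pvStep x = x then 0 else pvCount f (pvStep x) + 1

theorem pvCount_succ (f : Nat) (x : Int) :
    pvCount (f + 1) x = if pvStep x = x then 0 else pvCount f (pvStep x) + 1 := rfl

theorem pvTransform_eq_map : ∀ l : List Int, pvTransform l = l.map pvStep := by
  intro l; induction l with
  | nil => rfl
  | cons d rest ih =>
    show _ :: pvTransform rest = pvStep d :: rest.map pvStep
    rw [ih]
    rfl

theorem pvSW_mono {n m : Nat} {x : Int} (h : pvSW n x) (hnm : n ≤ m) : pvSW m x := by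
  unfold pvSW at *
  obtain ⟨k, rfl⟩ := Nat.exists_eq_add_of_le hnm
  rw [Nat.add_comm, Function.iterate_add_apply, Function.iterate_fixed h, h]

theorem pvSW_step {n : Nat} {x : Int} (h : pvSW n (pvStep x)) : pvSW (n + 1) x := by
  unfold pvSW at *
  rwa [Function.iterate_succ_apply]

theorem pvSW_zero {x : Int} (h : pvStep x = x) : pvSW 0 x := by
  unfold pvSW; simpa using h

theorem pvSteps_eq_count : ∀ (f : Nat) (x : Int) (c : Int), pvSteps f x c = c + (pvCount f x : Int) := by
  intro f
  induction f with
  | zero => intro x c; simp [pvSteps, pvCount]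
  | succ f ih =>
    intro x c
    by_cases h : pvStep x = x
    · simp [pvSteps, pvCount, h]
    · simp only [pvSteps, pvCount, if_neg h, ih]
      push_cast; ring

theorem pvCount_congr : ∀ (n : Nat) (x : Int) (f f' : Nat), pvSW n x → n ≤ f → n ≤ f' → pvCount f x = pvCount f' x := by
  intro n
  induction n with
  | zero =>
    intro x f f' hs _ _
    unfold pvSW at hs; simp only [Function.iterate_zero_apply] at hs
    cases f <;> cases f' <;> simp [pvCount, hs]
  | succ n ih =>
    intro x f f' hs hf hf'
    by_cases h : pvStep x = x
    · cases f <;> cases f' <;> simp [pvCount, h]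
    · obtain ⟨a, rfl⟩ : ∃ a, f = a + 1 := ⟨f - 1, by omega⟩
      obtain ⟨b, rfl⟩ : ∃ b, f' = b + 1 := ⟨f' - 1, by omega⟩
      have hs' : pvSW n (pvStep x) := by
        unfold pvSW at *; rwa [Function.iterate_succ_apply] at hs
      simp only [pvCount, if_neg h]
      rw [ih (pvStep x) a b hs' (by omega) (by omega)]

theorem pvCount_le : ∀ (n : Nat) (x : Int) (f : Nat), pvSW n x → pvCount f x ≤ n := by
  intro n
  induction n with
  | zero =>
    intro x f hs
    unfold pvSW at hs; simp only [Function.iterate_zero_apply] at hs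
    cases f <;> simp [pvCount, hs]
  | succ n ih =>
    intro x f hs
    by_cases h : pvStep x = x
    · cases f <;> simp [pvCount, h]
    · cases f with
      | zero => simp [pvCount]
      | succ a =>
        have hs' : pvSW n (pvStep x) := by
          unfold pvSW at *; rwa [Function.iterate_succ_apply] at hs
        simp only [pvCount, if_neg h]
        exact Nat.succ_le_succ (ih (pvStep x) a hs')

theorem pvCount_succ_of_unstable {x : Int} {n : Nat} (h : pvStep x ≠ x) (hs : pvSW n x) (hn : n ≤ 99) :
    pvCount 100 x = pvCount 100 (pvStep x) + 1 := by
  obtain ⟨m, rfl⟩ : ∃ m, n = m + 1 := by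
    cases n with
    | zero =>
      exfalso; unfold pvSW at hs; simp only [Function.iterate_zero_apply] at hs; exact h hs
    | succ m => exact ⟨m, rfl⟩
  have hs' : pvSW m (pvStep x) := by
    unfold pvSW at *; rwa [Function.iterate_succ_apply] at hs
  show pvCount (99 + 1) x = _
  rw [pvCount_succ, if_neg h,
    pvCount_congr m (pvStep x) 99 100 hs' (by omega) (by omega)]

theorem pvGood_step {x : Int} (h : pvGood x) : pvGood (pvStep x) := by
  have hm : PySem.Int.mod x 2 = x % 2 := PySem.Int.mod_eq_emod_of_pos (by norm_num)
  have hd : PySem.Int.floordiv x 2 = x / 2 := PySem.Int.floordiv_eq_ediv_of_pos (by norm_num)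
  obtain ⟨hpar, hub⟩ := h
  rw [hm] at hpar
  unfold pvStep
  rw [hm, hd]
  split_ifs with h1 h2
  · exact ⟨Or.inr (by omega), by omega⟩
  · refine ⟨Or.inr ?_, ?_⟩ <;> rcases hpar with hp | hp <;>
      first
      | exact absurd hp h2.2
      | omega
  · refine ⟨?_, hub⟩
    rw [hm]; exact hpar

theorem pvStable_of_even_lt {x : Int} (h2 : PySem.Int.mod x 2 = 0) (hlt : x < 50) : pvStep x = x := by
  unfold pvStep
  rw [if_neg (fun hc => absurd hc.1 (by omega)), if_neg (fun hc => hc.2 h2)]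

theorem pvSW_of_good_le : ∀ (n : Nat) (x : Int), pvGood x → x ≤ 50 * 2 ^ n → pvSW (n + 6) x := by
  intro n
  induction n with
  | zero =>
    intro x hg hx
    simp only [pow_zero, mul_one] at hx
    by_cases hneg : -1 ≤ x
    · interval_cases x <;> (unfold pvSW; decide)
    · have hev : PySem.Int.mod x 2 = 0 := by
        rcases hg.1 with h | h
        · exact h
        · omega
      exact pvSW_mono (pvSW_zero (pvStable_of_even_lt hev (by omega))) (by omega)
  | succ n ih =>
    intro x hg hx
    by_cases hsm : x ≤ 50 * 2 ^ n
    · exact pvSW_mono (ih x hg hsm) (by omega)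
    · have hm : PySem.Int.mod x 2 = x % 2 := PySem.Int.mod_eq_emod_of_pos (by norm_num)
      have hx50 : 50 ≤ x := by
        have h1 : (1 : Int) ≤ 2 ^ n := one_le_pow₀ (by norm_num)
        nlinarith
      by_cases hev : x % 2 = 0
      · have hstep : pvStep x = x / 2 := by
          unfold pvStep
          rw [if_pos ⟨by omega, by rw [hm]; exact hev⟩,
            PySem.Int.floordiv_eq_ediv_of_pos (by norm_num)]
        have hgood' : pvGood (pvStep x) := pvGood_step hg
        have hbound : pvStep x ≤ 50 * 2 ^ n := by
          rw [hstep]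
          have h2 : (50 : Int) * 2 ^ (n + 1) = 50 * 2 ^ n * 2 := by ring
          omega
        exact pvSW_mono (pvSW_step (ih _ hgood' hbound)) (by omega)
      · have hfix : pvStep x = x := by
          unfold pvStep
          rw [if_neg (fun hc => hev (by rw [hm] at hc; exact hc.2)),
            if_neg (fun hc => absurd hc.1 (by omega))]
        exact pvSW_mono (pvSW_zero hfix) (by omega)

theorem pvSW32_of_good {x : Int} (h : pvGood x) : pvSW 32 x :=
  pvSW_of_good_le 26 x h (by have := h.2; omega)

-- Nat-valued maximum that solution_alt computes
def pvMax (arr : List Int) : Nat := arr.foldl (fun b x => max b (pvCount 100 x)) 0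

theorem pvAlt_foldl_cast : ∀ (arr : List Int) (b : Nat),
    arr.foldl (fun best x => let c := pvSteps 100 x 0; if c > best then c else best) (b : Int)
      = (arr.foldl (fun b x => max b (pvCount 100 x)) b : Nat) := by
  intro arr
  induction arr with
  | nil => intro b; rfl
  | cons y rest ih =>
    intro b
    simp only [List.foldl]
    have h : (if pvSteps 100 y 0 > (b : Int) then pvSteps 100 y 0 else (b : Int))
        = ((max b (pvCount 100 y) : Nat) : Int) := by
      rw [pvSteps_eq_count]
      push_cast
      split_ifs <;> omega
    rw [h]
    exact ih _

theorem solution_alt_eq_pvMax (arr : List Int) : solution_alt arr = (pvMax arr : Int) := by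
  unfold solution_alt pvMax
  simpa using pvAlt_foldl_cast arr 0

theorem pvCount_zero_of_fix {x : Int} (h : pvStep x = x) : pvCount 100 x = 0 := by
  show pvCount (99 + 1) x = 0
  rw [pvCount_succ, if_pos h]

theorem pvMax_zero_of_stable : ∀ (arr : List Int), (∀ x ∈ arr, pvStep x = x) → pvMax arr = 0 := by
  have aux : ∀ (arr : List Int), (∀ x ∈ arr, pvStep x = x) →
      ∀ b : Nat, arr.foldl (fun b x => max b (pvCount 100 x)) b = b := by
    intro arr
    induction arr with
    | nil => intro _ b; rfl
    | cons y rest ih =>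
      intro h b
      simp only [List.foldl]
      rw [pvCount_zero_of_fix (h y (List.mem_cons_self ..)), Nat.max_eq_left (Nat.zero_le b)]
      exact ih (fun x hx => h x (List.mem_cons_of_mem _ hx)) b
  intro arr h; exact aux arr h 0

theorem pvFoldl_le_self : ∀ (l : List Int) (b : Nat),
    b ≤ l.foldl (fun b x => max b (pvCount 100 x)) b := by
  intro l
  induction l with
  | nil => intro b; exact le_refl b
  | cons y rest ih =>
    intro b
    exact le_trans (Nat.le_max_left _ _) (ih (max b (pvCount 100 y)))

theorem pvMax_ge_mem : ∀ (arr : List Int) (b : Nat) (x : Int), x ∈ arr →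
    pvCount 100 x ≤ arr.foldl (fun b x => max b (pvCount 100 x)) b := by
  intro arr
  induction arr with
  | nil => intro b x hx; cases hx
  | cons y rest ih =>
    intro b x hx
    simp only [List.foldl]
    rcases List.mem_cons.mp hx with rfl | hx
    · exact le_trans (Nat.le_max_right _ _) (pvFoldl_le_self rest _)
    · exact ih _ x hx

theorem pvMax_le : ∀ (arr : List Int) (b : Nat) (n : Nat), (∀ x ∈ arr, pvCount 100 x ≤ n) → b ≤ n →
    arr.foldl (fun b x => max b (pvCount 100 x)) b ≤ n := by
  intro arr
  induction arr with
  | nil => intro b n _ hb; exact hb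
  | cons y rest ih =>
    intro b n h hb
    simp only [List.foldl]
    exact ih _ n (fun x hx => h x (List.mem_cons_of_mem _ hx))
      (by have := h y (List.mem_cons_self ..); omega)

theorem pvMapFix : ∀ (l : List Int), l.map pvStep = l ↔ ∀ x ∈ l, pvStep x = x := by
  intro l
  induction l with
  | nil => simp
  | cons y rest ih =>
    simp only [List.map, List.cons.injEq, List.mem_cons, ih]
    constructor
    · rintro ⟨h1, h2⟩ x hx
      rcases hx with rfl | hx
      · exact h1
      · exact h2 x hx
    · intro h
      exact ⟨h y (Or.inl rfl), fun x hx => h x (Or.inr hx)⟩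

theorem pvMax_map_step : ∀ (arr : List Int), (∀ x ∈ arr, pvGood x) →
    pvMax (arr.map pvStep) = pvMax arr - 1 := by
  have point : ∀ x : Int, pvGood x → pvCount 100 (pvStep x) = pvCount 100 x - 1 := by
    intro x hg
    by_cases h : pvStep x = x
    · rw [h, pvCount_zero_of_fix h]
    · rw [pvCount_succ_of_unstable h (pvSW32_of_good hg) (by omega)]
      omega
  have aux : ∀ (arr : List Int), (∀ x ∈ arr, pvGood x) → ∀ b : Nat,
      (arr.map pvStep).foldl (fun b x => max b (pvCount 100 x)) (b - 1)
        = arr.foldl (fun b x => max b (pvCount 100 x)) b - 1 := by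
    intro arr
    induction arr with
    | nil => intro _ b; rfl
    | cons y rest ih =>
      intro h b
      simp only [List.map, List.foldl]
      rw [point y (h y (List.mem_cons_self ..))]
      have hmx : max (b - 1) (pvCount 100 y - 1) = max b (pvCount 100 y) - 1 := by omega
      rw [hmx]
      exact ih (fun x hx => h x (List.mem_cons_of_mem _ hx)) _
  intro arr h
  unfold pvMax
  simpa using aux arr h 0

theorem pvMax_pos : ∀ (arr : List Int), (∀ x ∈ arr, pvGood x) → arr.map pvStep ≠ arr → 1 ≤ pvMax arr := by
  intro arr hg hne
  have hex : ∃ x ∈ arr, pvStep x ≠ x := by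
    by_contra hall
    push Not at hall
    exact hne ((pvMapFix arr).mpr hall)
  obtain ⟨x, hx, hstep⟩ := hex
  have h1 : 1 ≤ pvCount 100 x := by
    show 1 ≤ pvCount (99 + 1) x
    rw [pvCount_succ, if_neg hstep]
    omega
  exact le_trans h1 (pvMax_ge_mem arr 0 x hx)

theorem pvMax_le32 (arr : List Int) (hg : ∀ x ∈ arr, pvGood x) : pvMax arr ≤ 32 :=
  pvMax_le arr 0 32 (fun x hx => pvCount_le 32 x 100 (pvSW32_of_good (hg x hx))) (by omega)

theorem pvLoopA_main : ∀ (fuel : Nat) (before arr : List Int) (count : Int),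
    (∀ x ∈ arr, pvGood x) → before ≠ arr → pvMax arr + 2 ≤ fuel →
    pvLoopA fuel before arr count = count + (pvMax arr : Int) := by
  intro fuel
  induction fuel with
  | zero => intro _ _ _ _ _ hf; omega
  | succ fuel ih =>
    intro before arr count hg hne hf
    simp only [pvLoopA, if_neg hne]
    rw [pvTransform_eq_map]
    by_cases hfix : arr.map pvStep = arr
    · have hm0 : pvMax arr = 0 := pvMax_zero_of_stable arr ((pvMapFix arr).mp hfix)
      rw [hfix]
      obtain ⟨g, rfl⟩ : ∃ g, fuel = g + 1 := ⟨fuel - 1, by omega⟩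
      simp [pvLoopA, hm0]
    · have hg' : ∀ x ∈ arr.map pvStep, pvGood x := by
        intro x hx
        obtain ⟨y, hy, rfl⟩ := List.mem_map.mp hx
        exact pvGood_step (hg y hy)
      have hpos : 1 ≤ pvMax arr := pvMax_pos arr hg hfix
      have hmap : pvMax (arr.map pvStep) = pvMax arr - 1 := pvMax_map_step arr hg
      rw [ih arr (arr.map pvStep) (count + 1) hg' (fun h => hfix h.symm) (by omega), hmap]
      omega

theorem good_of_dom_pre (arr : List Int) (hd : Dom_solution arr) (hp : Pre_solution arr) :
    ∀ x ∈ arr, pvGood x := by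
  intro x hx
  refine ⟨hp x hx, ?_⟩
  have h := (List.all_eq_true.mp hd) x hx
  simp only [pvDomInt, decide_eq_true_eq] at h
  exact h.2

-- ===== VERDICT (by name: the statement is the Claim_ definition above) =====
theorem solution_spec : Claim_unchanged_solution := by
  intro arr hd hp hnd
  have hg := good_of_dom_pre arr hd hp
  show solution arr = solution_alt arr
  unfold solution
  have h0 : (0 : Int) * (arr.length : Int) = 0 := by ring
  rw [h0]
  have hne : ([(0 : Int)] : List Int) ≠ arr := fun h => hnd (by unfold D_solution; exact h.symm)
  rw [pvLoopA_main 100 [(0 : Int)] arr 0 hg hne (by have := pvMax_le32 arr hg; omega)]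
  rw [solution_alt_eq_pvMax]
  omega

theorem solution_changed : Claim_changed_solution := by
  unfold Claim_changed_solution; decide

theorem solution_tight : Claim_exact_solution := by
  intro arr _ _ hD
  unfold D_solution at hD
  subst hD
  decide
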